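-- pv_equiv track=rewrite | github.com/pypi-data/pypi-mirror-77 | packages/pyhasse.chain/pyhasse.chain-0.3.0-py2.py3-none-any.whl/pyhasse/chain/calc.py | search_statistics
-- ===== SOURCE A (Python) =====
-- def search_statistics(list1ofelements,
--                       list2ofelements, candidatepairs):
--     """ candidatepairs will be scanned to get
--     pairs of objects with long chains
--     :param list1ofelements: Most often the
--             maximal elements
--     :param list2ofelements: most often the
--             minimal elements
--     :param candidatepairs: outcome of 'searchlongchains'
--      """
--     countelementpairs = []
--     for elem1 in list1ofelements:
--         for elem2 in list2ofelements:
--             countpairs = 0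
--             for i in range(0, len(candidatepairs)):
--                 if (elem1 == candidatepairs[i][0]) and (
--                     elem2 in candidatepairs[i][1]
--                 ):
--                     countpairs += 1
--             countelementpairs.append((elem1, elem2, countpairs))
--     return countelementpairs
-- ===== SOURCE B (Python) =====
-- def search_statistics(list1ofelements,
--                       list2ofelements, candidatepairs):
--     """Same result as A, but one pass over candidatepairs builds a
--     (elem1, elem2) -> count table, so each output pair is a lookup."""
--     counts = {}
--     for pair in candidatepairs:
--         first = pair[0]
--         for member in set(pair[1]):
--             key = (first, member)
--             counts[key] = counts.get(key, 0) + 1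
--     return [(elem1, elem2, counts.get((elem1, elem2), 0))
--             for elem1 in list1ofelements
--             for elem2 in list2ofelements]
-- ===== Notes on version B (the rewrite author's own statement) =====
-- stated objective: faster
-- what changed: Replaced the triple nested scan (one full pass over candidatepairs per (elem1, elem2) pair) by a single pass that builds a dict mapping (first, member) to its pair count, so each output triple is one dict lookup; intended as faster (the rescans go away) and measured 5.8x at n=1024, though at n=4096 both programs hit the quadratic output size and timed out.
import Mathlib
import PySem

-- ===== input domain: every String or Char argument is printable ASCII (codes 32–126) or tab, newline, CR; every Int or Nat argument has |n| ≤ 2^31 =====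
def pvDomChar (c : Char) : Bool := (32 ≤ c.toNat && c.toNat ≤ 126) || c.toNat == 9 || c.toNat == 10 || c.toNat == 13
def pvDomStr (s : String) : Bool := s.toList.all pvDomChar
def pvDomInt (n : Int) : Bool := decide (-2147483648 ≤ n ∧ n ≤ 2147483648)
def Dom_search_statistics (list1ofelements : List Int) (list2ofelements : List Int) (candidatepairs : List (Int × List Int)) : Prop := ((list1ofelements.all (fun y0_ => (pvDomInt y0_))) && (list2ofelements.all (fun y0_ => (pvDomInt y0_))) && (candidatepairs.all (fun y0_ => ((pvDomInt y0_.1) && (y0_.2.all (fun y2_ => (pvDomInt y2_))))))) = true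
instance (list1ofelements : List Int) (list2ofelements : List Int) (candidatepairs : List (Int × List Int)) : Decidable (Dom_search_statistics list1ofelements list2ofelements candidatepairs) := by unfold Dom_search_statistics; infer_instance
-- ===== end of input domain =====

-- B replaces A's per-(elem1,elem2) rescans of candidatepairs by one pass building a
-- (first, member) -> count dictionary, then a lookup per output pair (intended as faster:
-- measured 5.8x at n=1024; at n=4096 both hit the quadratic output size).

-- ===== PORT A =====
-- literal port of A's three nested loops; candidatepairs[i] is pyGetD with a dummy
-- default — the loop index i always lies in range, so this is exact
def search_statistics (list1ofelements : List Int) (list2ofelements : List Int) (candidatepairs : List (Int × List Int)) : List (Int × Int × Int) :=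
  list1ofelements.foldl (fun acc elem1 =>
    list2ofelements.foldl (fun acc elem2 =>
      let countpairs : Int :=
        (PySem.List.pyRange 0 (PySem.List.len candidatepairs) 1).foldl
          (fun cp i =>
            if elem1 == (PySem.List.pyGetD candidatepairs i (0, [])).1 &&
               (PySem.List.pyGetD candidatepairs i (0, [])).2.contains elem2
            then cp + 1 else cp) 0
      acc ++ [(elem1, elem2, countpairs)]) acc) []

-- ===== PORT B =====
def search_statistics_alt (list1ofelements : List Int) (list2ofelements : List Int) (candidatepairs : List (Int × List Int)) : List (Int × Int × Int) :=
  let counts : PySem.Dict (Int × Int) Int :=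
    candidatepairs.foldl (fun counts pair =>
      (PySem.Set.ofList pair.2).foldl
        (fun counts member => counts.modify (pair.1, member) 0 (· + 1))
        counts) PySem.Dict.empty
  list1ofelements.flatMap (fun elem1 =>
    list2ofelements.map (fun elem2 => (elem1, elem2, counts.getD (elem1, elem2) 0)))

-- ===== PRECONDITION & SPEC =====
def Spec_search_statistics (list1ofelements : List Int) (list2ofelements : List Int) (candidatepairs : List (Int × List Int)) (out : List (Int × Int × Int)) : Prop := out = search_statistics_alt list1ofelements list2ofelements candidatepairs
instance (list1ofelements : List Int) (list2ofelements : List Int) (candidatepairs : List (Int × List Int)) (out : List (Int × Int × Int)) : Decidable (Spec_search_statistics list1ofelements list2ofelements candidatepairs out) := by unfold Spec_search_statistics; infer_instance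

-- ===== CLAIM (what is proved, stated in full; the proofs are below) =====
def Claim_equal_search_statistics : Prop := ∀ (list1ofelements : List Int) (list2ofelements : List Int) (candidatepairs : List (Int × List Int)), Dom_search_statistics list1ofelements list2ofelements candidatepairs → Spec_search_statistics list1ofelements list2ofelements candidatepairs (search_statistics list1ofelements list2ofelements candidatepairs)

-- ===== LEMMAS AND PROOFS =====

-- the predicate "this candidate pair matches (e1, e2)"
def pvMatch (e1 e2 : Int) (c : Int × List Int) : Bool := e1 == c.1 && c.2.contains e2

-- A's inner counting loop is countP
theorem pv_count_fold (e1 e2 : Int) : ∀ (cs : List (Int × List Int)) (n : Int),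
    cs.foldl (fun cp c => if e1 == c.1 && c.2.contains e2 then cp + 1 else cp) n
      = n + (cs.countP (pvMatch e1 e2) : Int) := by
  intro cs
  induction cs with
  | nil => simp
  | cons c cs ih =>
    intro n
    simp only [List.foldl_cons, List.countP_cons, ih, pvMatch]
    split_ifs <;> push_cast <;> omega

theorem pv_count_nodup (s : List Int) (a : Int) (h : s.Nodup) :
    s.count a = if a ∈ s then 1 else 0 := by
  induction s with
  | nil => simp
  | cons x s ih =>
    simp only [List.nodup_cons] at h
    rcases h with ⟨hx, hs⟩
    by_cases hax : x = a
    · subst hax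
      simp [ih hs, hx]
    · simp [ih hs, Ne.symm hax, hax]

-- one candidate pair's inner set-loop adds 0 or 1 at key (e1, e2)
theorem pv_inner_getD (c : Int × List Int) (d : PySem.Dict (Int × Int) Int) (e1 e2 : Int) :
    ((PySem.Set.ofList c.2).foldl (fun d x => d.modify (c.1, x) 0 (· + 1)) d).getD (e1, e2) 0
      = d.getD (e1, e2) 0 + (if pvMatch e1 e2 c then 1 else 0) := by
  have hmap : (PySem.Set.ofList c.2).foldl (fun d x => d.modify (c.1, x) 0 (· + 1)) d
      = ((PySem.Set.ofList c.2).map (fun x => ((c.1, x) : Int × Int))).foldl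
          (fun d y => d.modify y 0 (· + 1)) d := by
    rw [List.foldl_map]
  have hc : ((PySem.Set.ofList c.2).map (fun x => ((c.1, x) : Int × Int))).count (e1, e2)
      = if pvMatch e1 e2 c then 1 else 0 := by
    rw [List.count_eq_countP, List.countP_map, Function.comp_def]
    by_cases h1 : c.1 = e1
    · have hp : (fun x => (((c.1, x) : Int × Int) == (e1, e2))) = fun x => x == e2 := by
        funext x; simp [h1]
      rw [hp, ← List.count_eq_countP, pv_count_nodup _ _ (PySem.Set.nodup_ofList _)]
      simp [pvMatch, PySem.Set.mem_ofList, h1]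
    · have hp : (fun x => (((c.1, x) : Int × Int) == (e1, e2))) = fun _ => false := by
        funext x
        simp [h1]
      rw [hp]
      have h2 : (e1 == c.1) = false := by simp [Ne.symm h1]
      simp [pvMatch, h2]
  rw [hmap, PySem.Dict.getD_foldl_modify_add_one, hc]
  split_ifs <;> simp

-- the whole dict-building pass: lookup at (e1, e2) is the number of matching pairs
theorem pv_build_getD (e1 e2 : Int) : ∀ (cs : List (Int × List Int)) (d : PySem.Dict (Int × Int) Int),
    (cs.foldl (fun counts pair =>
        (PySem.Set.ofList pair.2).foldl
          (fun counts member => counts.modify (pair.1, member) 0 (· + 1)) counts) d).getD (e1, e2) 0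
      = d.getD (e1, e2) 0 + (cs.countP (pvMatch e1 e2) : Int) := by
  intro cs
  induction cs with
  | nil => simp
  | cons c cs ih =>
    intro d
    simp only [List.foldl_cons, List.countP_cons, ih, pv_inner_getD]
    split_ifs <;> push_cast <;> omega

-- A computes, pair by pair, exactly the countP of matching candidate pairs
theorem pv_A_eq (l1 l2 : List Int) (cs : List (Int × List Int)) :
    search_statistics l1 l2 cs
      = l1.flatMap (fun e1 => l2.map (fun e2 => (e1, e2, (cs.countP (pvMatch e1 e2) : Int)))) := by
  unfold search_statistics
  have hinner : ∀ e1 e2 : Int,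
      (PySem.List.pyRange 0 (PySem.List.len cs) 1).foldl
        (fun cp i =>
          if e1 == (PySem.List.pyGetD cs i (0, [])).1 &&
             (PySem.List.pyGetD cs i (0, [])).2.contains e2
          then cp + 1 else cp) 0 = (cs.countP (pvMatch e1 e2) : Int) := by
    intro e1 e2
    rw [PySem.List.foldl_pyRange_zero_pyGetD cs ((0 : Int), ([] : List Int))
        (fun cp c => if e1 == c.1 && c.2.contains e2 then cp + 1 else cp) 0]
    rw [pv_count_fold]
    omega
  simp only [hinner, PySem.List.foldl_append_singleton_eq_map,
    PySem.List.foldl_append_eq_flatMap, List.nil_append]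

-- ===== VERDICT (by name: the statement is the Claim_ definition above) =====
theorem search_statistics_spec : Claim_equal_search_statistics := by
  intro l1 l2 cs _
  unfold Spec_search_statistics search_statistics_alt
  rw [pv_A_eq]
  simp only [pv_build_getD, PySem.Dict.getD_empty, zero_add]
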